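-- pv_equiv track=rewrite | github.com/wyk18703232953/myResearch | codeComplex/data/filteredData/python/logn/python_logn_0215.py | count_really_big_numbers
-- ===== SOURCE A (Python) =====
-- def somaDigitos(x: int) -> int:
--     resp = 0
--     while x > 0:
--         resp += x % 10
--         x //= 10
--     return resp
--
-- def count_really_big_numbers(n: int, s: int) -> int:
--     def isReallyBigNumber(x: int) -> bool:
--         return x - somaDigitos(x) >= s
--
--     ini = 1
--     fim = n
--     ans = None
--
--     # Busca binária para achar o menor x em [1, n] tal que x - somaDigitos(x) >= s
--     while ini <= fim:
--         meio = (ini + fim) // 2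
--         if isReallyBigNumber(meio):
--             ans = meio
--             fim = meio - 1
--         else:
--             ini = meio + 1
--
--     if ans is not None:
--         return n - ans + 1
--     else:
--         return 0
-- ===== SOURCE B (Python) =====
-- def somaDigitos(x: int) -> int:
--     if x <= 0:
--         return 0
--     return x % 10 + somaDigitos(x // 10)
--
-- def count_really_big_numbers(n: int, s: int) -> int:
--     # The least x with x - somaDigitos(x) >= s lies at most 9*digits past max(s, 1):
--     # scan that short window upward instead of binary-searching [1, n].
--     x = s if s > 1 else 1
--     while x - somaDigitos(x) < s:
--         x += 1
--     return max(n - x + 1, 0)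
-- ===== Notes on version B (the rewrite author's own statement) =====
-- stated objective: alternative
-- what changed: Replaces the binary search over [1,n] by direct threshold location: since digitsum(x) <= 9*digits(x), the least x with x - digitsum(x) >= s lies in a short window just above max(s,1), so B scans that window upward and returns max(n - x + 1, 0); the digit sum is plain recursion instead of a while-loop accumulator.
import Mathlib
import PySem

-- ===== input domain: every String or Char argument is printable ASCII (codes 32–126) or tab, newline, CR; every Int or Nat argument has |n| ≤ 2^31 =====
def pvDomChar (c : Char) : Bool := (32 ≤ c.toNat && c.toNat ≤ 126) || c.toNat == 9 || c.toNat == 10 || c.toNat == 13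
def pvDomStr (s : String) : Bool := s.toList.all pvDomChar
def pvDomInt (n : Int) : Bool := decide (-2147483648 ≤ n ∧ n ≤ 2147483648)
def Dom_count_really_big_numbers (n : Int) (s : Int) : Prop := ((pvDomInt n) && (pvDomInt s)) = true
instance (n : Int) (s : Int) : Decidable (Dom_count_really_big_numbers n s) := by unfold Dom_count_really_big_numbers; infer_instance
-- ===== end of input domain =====

-- B replaces A's binary search over [1,n] by direct threshold location: the least x
-- with x - digitsum(x) >= s lies in a short window above max(s,1), so B scans that
-- window and returns max(n - x + 1, 0) (same return value; objective: alternative).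

-- termination lemmas for the ports (cited by name in decreasing_by)
theorem pv_div10_toNat_lt (x : Int) (h : 0 < x) :
    (PySem.Int.floordiv x 10).toNat < x.toNat := by
  rw [PySem.Int.floordiv_eq_ediv_of_pos (by omega : (0:Int) < 10)]; omega

-- ===== PORT A =====
-- A's somaDigitos: while x > 0: resp += x % 10; x //= 10
def somaDigitosWhile (x resp : Int) : Int :=
  if x > 0 then somaDigitosWhile (PySem.Int.floordiv x 10) (resp + PySem.Int.mod x 10)
  else resp
termination_by x.toNat
decreasing_by exact pv_div10_toNat_lt x (by omega)

def somaDigitos (x : Int) : Int := somaDigitosWhile x 0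

-- A's binary-search loop over [ini, fim] carrying ans; the Nat fuel only bounds the
-- iteration count ((fim+1-ini).toNat suffices: the interval shrinks every round)
def bsearch (s : Int) : Nat → Int → Int → Option Int → Option Int
  | 0, _, _, ans => ans
  | fuel + 1, ini, fim, ans =>
    if ini ≤ fim then
      let meio := PySem.Int.floordiv (ini + fim) 2
      if meio - somaDigitos meio ≥ s then bsearch s fuel ini (meio - 1) (some meio)
      else bsearch s fuel (meio + 1) fim ans
    else ans

def count_really_big_numbers (n : Int) (s : Int) : Int :=
  match bsearch s n.toNat 1 n none with
  | some a => n - a + 1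
  | none => 0

-- ===== PORT B =====
theorem pv_div10_toNat_lt_b (x : Int) (h : 0 < x) :
    (PySem.Int.floordiv x 10).toNat < x.toNat := by
  rw [PySem.Int.floordiv_eq_ediv_of_pos (by omega : (0:Int) < 10)]; omega

-- B's somaDigitos: plain recursion
def somaDigitosRec (x : Int) : Int :=
  if x ≤ 0 then 0
  else PySem.Int.mod x 10 + somaDigitosRec (PySem.Int.floordiv x 10)
termination_by x.toNat
decreasing_by exact pv_div10_toNat_lt_b x (by omega)

-- B's while loop: scan upward from max(s,1) until x - somaDigitos(x) >= s; the Nat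
-- fuel only bounds the iteration count (within Dom the hit comes within 100 steps)
def scanUp (s : Int) : Nat → Int → Int
  | 0, x => x
  | fuel + 1, x =>
    if x - somaDigitosRec x < s then scanUp s fuel (x + 1) else x

def count_really_big_numbers_alt (n : Int) (s : Int) : Int :=
  max (n - scanUp s 200 (if s > 1 then s else 1) + 1) 0

-- ===== PRECONDITION & SPEC =====
def Spec_count_really_big_numbers (n : Int) (s : Int) (out : Int) : Prop := out = count_really_big_numbers_alt n s
instance (n : Int) (s : Int) (out : Int) : Decidable (Spec_count_really_big_numbers n s out) := by unfold Spec_count_really_big_numbers; infer_instance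

-- ===== CLAIM (what is proved, stated in full; the proofs are below) =====
def Claim_equal_count_really_big_numbers : Prop := ∀ (n : Int) (s : Int), Dom_count_really_big_numbers n s → Spec_count_really_big_numbers n s (count_really_big_numbers n s)

-- ===== LEMMAS AND PROOFS =====


-- A's accumulator loop computes B's recursive digit sum
theorem somaDigitosWhile_eq (x r : Int) : somaDigitosWhile x r = r + somaDigitosRec x := by
  induction hk : x.toNat using Nat.strong_induction_on generalizing x r with
  | _ k ih =>
    rw [somaDigitosWhile, somaDigitosRec]
    by_cases hx : x > 0
    · have hd : PySem.Int.floordiv x 10 = x / 10 :=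
        PySem.Int.floordiv_eq_ediv_of_pos (by omega)
      rw [if_pos hx, if_neg (by omega), ih (PySem.Int.floordiv x 10).toNat (by rw [hd]; omega) _ _ rfl]
      ring
    · rw [if_neg hx, if_pos (by omega)]
      ring

theorem somaDigitos_eq (x : Int) : somaDigitos x = somaDigitosRec x := by
  rw [somaDigitos, somaDigitosWhile_eq, zero_add]

-- the digit sum grows by at most 1 from x to x+1
theorem somaDigitosRec_succ_le (x : Int) (hx : 0 ≤ x) :
    somaDigitosRec (x + 1) ≤ somaDigitosRec x + 1 := by
  induction hk : x.toNat using Nat.strong_induction_on generalizing x with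
  | _ k ih =>
    have h10 : (0:Int) < 10 := by omega
    rw [somaDigitosRec, if_neg (by omega : ¬ x + 1 ≤ 0),
        PySem.Int.mod_eq_emod_of_pos h10, PySem.Int.floordiv_eq_ediv_of_pos h10]
    by_cases hx0 : x ≤ 0
    · have hx' : x = 0 := by omega
      subst hx'
      norm_num
      omega
    · conv_rhs => rw [somaDigitosRec]
      rw [if_neg hx0, PySem.Int.mod_eq_emod_of_pos h10,
          PySem.Int.floordiv_eq_ediv_of_pos h10]
      by_cases hr : x % 10 < 9
      · have e1 : (x + 1) % 10 = x % 10 + 1 := by omega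
        have e2 : (x + 1) / 10 = x / 10 := by omega
        rw [e1, e2]; omega
      · have e1 : (x + 1) % 10 = 0 := by omega
        have e2 : (x + 1) / 10 = x / 10 + 1 := by omega
        have hih := ih (x / 10).toNat (by omega) (x / 10) (by omega) rfl
        rw [e1, e2]; omega

-- x - digitsum(x) is monotone (nondecreasing) on the nonnegative integers
theorem sub_ds_mono (x y : Int) (hx : 0 ≤ x) (hxy : x ≤ y) :
    x - somaDigitosRec x ≤ y - somaDigitosRec y := by
  have key : ∀ (k : Nat), x - somaDigitosRec x ≤ (x + k) - somaDigitosRec (x + k) := by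
    intro k
    induction k with
    | zero => simp
    | succ m ihm =>
      have h := somaDigitosRec_succ_le (x + m) (by omega)
      have e : x + ((m : Int) + 1) = (x + m) + 1 := by ring
      push_cast
      rw [e]
      omega
  have hk := key (y - x).toNat
  have : ((y - x).toNat : Int) = y - x := by omega
  rw [this] at hk
  simpa using hk

-- postcondition of A's binary search: it returns the least x in [1,n] with
-- x - digitsum(x) >= s (as some x), or none when no such x exists
theorem bsearch_post (s n : Int) (fuel : Nat) :
    ∀ (ini fim : Int) (ans : Option Int), (fim + 1 - ini).toNat ≤ fuel →
    1 ≤ ini → fim ≤ n →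
    (∀ x, 1 ≤ x → x < ini → ¬ (x - somaDigitosRec x ≥ s)) →
    (ans = none → fim = n) →
    (∀ a, ans = some a → 1 ≤ a ∧ a = fim + 1 ∧ a ≤ n ∧ a - somaDigitosRec a ≥ s) →
    (match bsearch s fuel ini fim ans with
     | none => ∀ x, 1 ≤ x → x ≤ n → ¬ (x - somaDigitosRec x ≥ s)
     | some a => 1 ≤ a ∧ a ≤ n ∧ (∀ x, 1 ≤ x → x < a → ¬ (x - somaDigitosRec x ≥ s)) ∧
                 a - somaDigitosRec a ≥ s) := by
  induction fuel with
  | zero =>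
    intro ini fim ans hk h1 h2 hinv1 hnone hsome
    rw [bsearch]
    cases ans with
    | none =>
      have hf := hnone rfl
      exact fun x hx1 hx2 => hinv1 x hx1 (by omega)
    | some a =>
      obtain ⟨ha1, ha2, ha3, ha4⟩ := hsome a rfl
      exact ⟨ha1, by omega, fun x hx1 hx2 => hinv1 x hx1 (by omega), ha4⟩
  | succ fuel ih =>
    intro ini fim ans hk h1 h2 hinv1 hnone hsome
    rw [bsearch]
    by_cases hle : ini ≤ fim
    · rw [if_pos hle]
      have hb := PySem.Int.floordiv_two_mid_bounds hle
      simp only [somaDigitos_eq]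
      rw [show (have meio := PySem.Int.floordiv (ini + fim) 2;
            if meio - somaDigitosRec meio ≥ s then bsearch s fuel ini (meio - 1) (some meio)
            else bsearch s fuel (meio + 1) fim ans) =
          (if PySem.Int.floordiv (ini + fim) 2 -
                somaDigitosRec (PySem.Int.floordiv (ini + fim) 2) ≥ s then
             bsearch s fuel ini (PySem.Int.floordiv (ini + fim) 2 - 1)
               (some (PySem.Int.floordiv (ini + fim) 2))
           else bsearch s fuel (PySem.Int.floordiv (ini + fim) 2 + 1) fim ans) from rfl]
      by_cases hp : PySem.Int.floordiv (ini + fim) 2 -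
          somaDigitosRec (PySem.Int.floordiv (ini + fim) 2) ≥ s
      · rw [if_pos hp]
        refine ih ini _ _ (by omega) h1 (by omega) hinv1 (by simp) ?_
        intro a ha
        rw [Option.some_inj] at ha
        subst ha
        exact ⟨by omega, by omega, by omega, hp⟩
      · rw [if_neg hp]
        refine ih _ fim ans (by omega) (by omega) h2 ?_ hnone hsome
        intro x hx1 hx2
        by_cases hxi : x < ini
        · exact hinv1 x hx1 hxi
        · intro hpx
          exact hp (le_trans hpx (sub_ds_mono x _ (by omega) (by omega)))
    · rw [if_neg hle]
      cases ans with
      | none =>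
        have hf := hnone rfl
        exact fun x hx1 hx2 => hinv1 x hx1 (by omega)
      | some a =>
        obtain ⟨ha1, ha2, ha3, ha4⟩ := hsome a rfl
        exact ⟨ha1, by omega, fun x hx1 hx2 => hinv1 x hx1 (by omega), ha4⟩

-- digit sums are nonnegative
theorem somaDigitosRec_nonneg (x : Int) : 0 ≤ somaDigitosRec x := by
  induction hk : x.toNat using Nat.strong_induction_on generalizing x with
  | _ k ih =>
    rw [somaDigitosRec]
    by_cases hx : x ≤ 0
    · rw [if_pos hx]
    · rw [if_neg hx]
      have hd : PySem.Int.floordiv x 10 = x / 10 :=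
        PySem.Int.floordiv_eq_ediv_of_pos (by omega)
      have h1 := PySem.Int.mod_nonneg x (by omega : (0:Int) < 10)
      have h2 := ih (PySem.Int.floordiv x 10).toNat (by rw [hd]; omega) _ rfl
      omega

-- a number below 10^k has digit sum at most 9*k
theorem somaDigitosRec_le (k : Nat) : ∀ (y : Int), 0 ≤ y → y < 10 ^ k →
    somaDigitosRec y ≤ 9 * k := by
  induction k with
  | zero =>
    intro y hy0 hyk
    have hy : y = 0 := by simp at hyk; omega
    subst hy
    rw [somaDigitosRec, if_pos (by omega)]
    simp
  | succ k ih =>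
    intro y hy0 hyk
    rw [somaDigitosRec]
    by_cases hy : y ≤ 0
    · rw [if_pos hy]; positivity
    · rw [if_neg hy]
      have hd : PySem.Int.floordiv y 10 = y / 10 :=
        PySem.Int.floordiv_eq_ediv_of_pos (by omega)
      have hm : PySem.Int.mod y 10 = y % 10 :=
        PySem.Int.mod_eq_emod_of_pos (by omega)
      have hpow : (10:Int) ^ (k + 1) = 10 ^ k * 10 := by ring
      have hq : y / 10 < 10 ^ k := by
        rw [Int.ediv_lt_iff_lt_mul (by omega)]
        omega
      have h2 := ih (y / 10) (by omega) hq
      rw [hd, hm]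
      push_cast
      omega

-- the scan returns the first x ≥ x0 with x - digitsum(x) ≥ s, given a hit within fuel
theorem scanUp_spec (s : Int) (fuel : Nat) :
    ∀ (x0 : Int), (∃ m : Nat, m ≤ fuel ∧ (x0 + m) - somaDigitosRec (x0 + m) ≥ s) →
    x0 ≤ scanUp s fuel x0 ∧ (scanUp s fuel x0) - somaDigitosRec (scanUp s fuel x0) ≥ s ∧
    (∀ y, x0 ≤ y → y < scanUp s fuel x0 → ¬ (y - somaDigitosRec y ≥ s)) := by
  induction fuel with
  | zero =>
    intro x0 hex
    obtain ⟨m, hm, hp⟩ := hex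
    have hm0 : m = 0 := by omega
    subst hm0
    rw [scanUp]
    refine ⟨le_refl _, by simpa using hp, fun y hy1 hy2 => by omega⟩
  | succ fuel ih =>
    intro x0 hex
    rw [scanUp]
    by_cases hp : x0 - somaDigitosRec x0 < s
    · rw [if_pos hp]
      obtain ⟨m, hm, hpm⟩ := hex
      have hm0 : m ≠ 0 := by
        intro h; subst h; simp at hpm; omega
      have hex' : ∃ m' : Nat, m' ≤ fuel ∧
          (x0 + 1 + m') - somaDigitosRec (x0 + 1 + m') ≥ s := by
        refine ⟨m - 1, by omega, ?_⟩
        have : x0 + 1 + ((m - 1 : Nat) : Int) = x0 + m := by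
          omega
        rw [this]
        exact hpm
      obtain ⟨h1, h2, h3⟩ := ih (x0 + 1) hex'
      refine ⟨by omega, h2, ?_⟩
      intro y hy1 hy2
      by_cases hyx : y = x0
      · subst hyx; omega
      · exact h3 y (by omega) hy2
    · rw [if_neg hp]
      exact ⟨le_refl _, by omega, fun y hy1 hy2 => by omega⟩

-- ===== VERDICT (by name: the statement is the Claim_ definition above) =====
theorem count_really_big_numbers_spec : Claim_equal_count_really_big_numbers := by
  intro n s hdom
  have hbounds : -2147483648 ≤ s ∧ s ≤ 2147483648 := by
    have := hdom
    unfold Dom_count_really_big_numbers at this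
    simp [pvDomInt] at this
    exact this.2
  unfold Spec_count_really_big_numbers
  unfold count_really_big_numbers count_really_big_numbers_alt
  set lo := if s > 1 then s else 1 with hlo
  have hlo1 : 1 ≤ lo := by rw [hlo]; split <;> omega
  have hlos : s ≤ lo ∧ lo ≤ 2147483649 := by rw [hlo]; split <;> omega
  -- a hit exists within the fuel: lo + 99 < 10^11 has digit sum ≤ 99
  have hex : ∃ m : Nat, m ≤ 200 ∧ (lo + m) - somaDigitosRec (lo + m) ≥ s := by
    refine ⟨99, by omega, ?_⟩
    have hb := somaDigitosRec_le 11 (lo + 99) (by omega) (by norm_num; omega)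
    push_cast at hb ⊢
    omega
  obtain ⟨hr1, hr2, hr3⟩ := scanUp_spec s 200 lo hex
  set r := scanUp s 200 lo with hrdef
  have H := bsearch_post s n n.toNat 1 n none (by omega) (by omega) (by omega)
    (fun x hx1 hx2 => absurd (by omega : ¬ (1 ≤ x)) (by simpa using hx1)) (fun _ => rfl)
    (by intro a ha; cases ha)
  cases hres : bsearch s n.toNat 1 n none with
  | none =>
    rw [hres] at H
    -- no x in [1,n] qualifies, so the scan's result r exceeds n
    have hrn : n < r := by
      by_contra h
      exact H r (by omega) (by omega) hr2
    show (0 : Int) = max (n - r + 1) 0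
    omega
  | some a =>
    rw [hres] at H
    obtain ⟨ha1, ha2, hlow, hp⟩ := H
    -- a and r are both the least qualifying number: a = r
    have has : s ≤ a := by
      have := somaDigitosRec_nonneg a
      omega
    have halo : lo ≤ a := by rw [hlo]; split <;> omega
    have hra : r ≤ a := by
      by_contra h
      exact hr3 a halo (by omega) hp
    have har : a ≤ r := by
      by_contra h
      exact hlow r (by omega) (by omega) hr2
    show n - a + 1 = max (n - r + 1) 0
    omega
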